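-- pv_equiv track=rewrite | github.com/jwross24/cs-sprint-challenge-hash-tables | hashtables/ex5/ex5.py | finder
-- ===== SOURCE A (Python) =====
-- def finder(files, queries):
--     """
--     YOUR CODE HERE
--     """
--     path_for_files = {}
--     result = []
--
--     for file in files:
--         filename = file.split('/')[-1]
--         if filename in path_for_files:
--             path_for_files[filename].append(file)
--         else:
--             path_for_files[filename] = [file]
--
--     for query in queries:
--         if query in path_for_files:
--             result.extend(path_for_files[query])
--
--     return result
-- ===== SOURCE B (Python) =====
-- def finder(files, queries):
--     result = []
--     for query in queries:
--         for file in files: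
--             if file.split('/')[-1] == query:
--                 result.append(file)
--     return result
-- ===== Notes on version B (the rewrite author's own statement) =====
-- stated objective: simpler
-- what changed: B drops the intermediate basename-to-paths dict entirely and, for each query, linearly scans the files appending those whose basename equals the query.
import Mathlib
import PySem

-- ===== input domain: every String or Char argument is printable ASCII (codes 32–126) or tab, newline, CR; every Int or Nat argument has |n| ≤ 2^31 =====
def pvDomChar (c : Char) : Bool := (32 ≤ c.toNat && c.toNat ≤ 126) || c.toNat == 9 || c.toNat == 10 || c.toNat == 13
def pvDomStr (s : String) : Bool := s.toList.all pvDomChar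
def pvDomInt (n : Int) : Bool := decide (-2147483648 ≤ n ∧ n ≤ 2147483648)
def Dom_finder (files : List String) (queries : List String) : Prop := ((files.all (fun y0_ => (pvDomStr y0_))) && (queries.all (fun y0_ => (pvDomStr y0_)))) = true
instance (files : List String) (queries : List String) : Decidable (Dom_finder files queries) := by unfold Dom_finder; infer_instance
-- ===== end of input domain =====

-- B replaces A's basename→paths dict with a direct per-query linear scan of the files (simpler, no index).

-- shared helper: file.split('/')[-1]; split with a nonempty separator never returns an
-- empty list, so the [-1] index never raises and the default "" is never used
def pvBasename (f : String) : String :=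
  PySem.List.pyGetD ((PySem.Str.split? f "/").getD []) (-1) ""

-- ===== PORT A =====
def finder (files : List String) (queries : List String) : List String :=
  let path_for_files : PySem.Dict String (List String) :=
    files.foldl (fun d file =>
      let filename := pvBasename file
      if d.contains filename then
        -- path_for_files[filename].append(file): in-place append to the stored list
        d.modify filename [] (fun xs => xs ++ [file])
      else
        d.insert filename [file]) PySem.Dict.empty
  queries.foldl (fun result query =>
      if path_for_files.contains query then
        -- result.extend(path_for_files[query]); lookup guarded by the contains test
        result ++ path_for_files.getD query []
      else result) []

-- ===== PORT B =====
def finder_alt (files : List String) (queries : List String) : List String :=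
  queries.foldl (fun result query =>
    files.foldl (fun result file =>
      if pvBasename file == query then result ++ [file] else result) result) []

-- ===== PRECONDITION & SPEC =====
def Spec_finder (files : List String) (queries : List String) (out : List String) : Prop := out = finder_alt files queries
instance (files : List String) (queries : List String) (out : List String) : Decidable (Spec_finder files queries out) := by unfold Spec_finder; infer_instance

-- ===== CLAIM (what is proved, stated in full; the proofs are below) =====
def Claim_equal_finder : Prop := ∀ (files : List String) (queries : List String), Dom_finder files queries → Spec_finder files queries (finder files queries)

-- ===== LEMMAS AND PROOFS =====

-- A's if/else insert-or-append step is exactly Dict.modify with default []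
lemma finder_step_eq_modify (d : PySem.Dict String (List String)) (file : String) :
    (if d.contains (pvBasename file) then
        d.modify (pvBasename file) [] (fun xs => xs ++ [file])
      else d.insert (pvBasename file) [file])
    = d.modify (pvBasename file) [] (fun xs => xs ++ [file]) := by
  by_cases h : d.contains (pvBasename file) = true
  · simp [h]
  · simp only [Bool.not_eq_true] at h
    simp [h, PySem.Dict.modify, PySem.Dict.getD_of_not_contains _ _ h]

-- the dict built by A's first loop maps q to the files whose basename is q, in order
lemma finder_dict_getD (files : List String) (q : String) :
    (files.foldl (fun d file =>
        let filename := pvBasename file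
        if d.contains filename then d.modify filename [] (fun xs => xs ++ [file])
        else d.insert filename [file]) PySem.Dict.empty).getD q []
      = files.filter (fun f => pvBasename f == q) := by
  have h1 : (files.foldl (fun d file =>
        let filename := pvBasename file
        if d.contains filename then d.modify filename [] (fun xs => xs ++ [file])
        else d.insert filename [file]) PySem.Dict.empty)
      = (files.map (fun f => (pvBasename f, f))).foldl
          (fun d p => d.modify p.1 [] (fun xs => xs ++ [p.2])) PySem.Dict.empty := by
    rw [List.foldl_map]
    exact List.foldl_ext _ _ _ (fun d f _ => finder_step_eq_modify d f)
  rw [h1, PySem.Dict.getD_foldl_modify_append]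
  simp [PySem.Dict.getD_empty, List.filter_map, Function.comp_def]

-- the guarded extend equals an unguarded append of the (possibly empty) group
lemma finder_extend_step (d : PySem.Dict String (List String)) (result : List String) (q : String) :
    (if d.contains q then result ++ d.getD q [] else result) = result ++ d.getD q [] := by
  by_cases h : d.contains q = true
  · simp [h]
  · simp only [Bool.not_eq_true] at h
    simp [h, PySem.Dict.getD_of_not_contains _ _ h]

-- ===== VERDICT (by name: the statement is the Claim_ definition above) =====
theorem finder_spec : Claim_equal_finder := by
  intro files queries _
  unfold Spec_finder finder finder_alt
  refine List.foldl_ext _ _ _ (fun result q _ => ?_)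
  rw [finder_extend_step, finder_dict_getD,
    PySem.List.foldl_append_if_eq_filter]
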